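-- pv_equiv track=rewrite | github.com/astralhpi/leetcode | 413/optimized.py | sliceLengths
-- ===== SOURCE A (Python) =====
-- def sliceLengths(A):
--     if len(A) < 3:
--         return []
--
--     result = []
--     prev, cur = A[:2]
--     count = 2
--     for num in A[2:]:
--         if cur - prev == num - cur:
--             count += 1
--         else:
--             result.append(count)
--             count = 2
--         prev, cur = cur, num
--     result.append(count)
--     return result
-- ===== SOURCE B (Python) =====
-- def _run_lengths(ds):
--     # run-length encode: lengths of maximal runs of equal consecutive values
--     if not ds:
--         return []
--     lens = []
--     d, cnt = ds[0], 1
--     for x in ds[1:]: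
--         if x == d:
--             cnt += 1
--         else:
--             lens.append(cnt)
--             d, cnt = x, 1
--     lens.append(cnt)
--     return lens
--
--
-- def sliceLengths(A):
--     if len(A) < 3:
--         return []
--     diffs = [b - a for a, b in zip(A, A[1:])]
--     return [m + 1 for m in _run_lengths(diffs)]
-- ===== Notes on version B (the rewrite author's own statement) =====
-- stated objective: simpler
-- what changed: Splits A's fused prev/cur segmenting loop into two phases: build the difference array, then run-length encode it and map each run length m to m+1.
import Mathlib
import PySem

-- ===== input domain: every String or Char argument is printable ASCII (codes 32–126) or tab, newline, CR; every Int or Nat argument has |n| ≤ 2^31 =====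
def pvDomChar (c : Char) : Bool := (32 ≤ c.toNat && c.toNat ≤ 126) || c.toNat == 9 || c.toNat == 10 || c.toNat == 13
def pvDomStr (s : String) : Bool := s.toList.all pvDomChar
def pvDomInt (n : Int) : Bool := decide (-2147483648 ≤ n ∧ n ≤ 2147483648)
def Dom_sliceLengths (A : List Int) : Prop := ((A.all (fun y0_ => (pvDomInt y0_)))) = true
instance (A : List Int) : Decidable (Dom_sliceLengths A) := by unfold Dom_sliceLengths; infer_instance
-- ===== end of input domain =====

-- B splits A's fused segmenting loop into two phases (difference array, then run-length
-- encoding mapped to m+1); same cost, simpler decomposition.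


-- ===== PORT A =====
-- literal transliteration of A: fused loop carrying (result, prev, cur, count)
def sliceLengths (A : List Int) : List Int :=
  if A.length < 3 then []
  else
    match A with
    | a0 :: a1 :: rest =>
      let st := rest.foldl (fun (s : List Int × Int × Int × Int) num =>
        let (result, prev, cur, count) := s
        if cur - prev == num - cur then (result, cur, num, count + 1)
        else (result ++ [count], cur, num, 2)) ([], a0, a1, 2)
      st.1 ++ [st.2.2.2]
    | _ => []  -- unreachable: length ≥ 3

-- ===== PORT B =====
-- run-length encode (lengths of maximal runs of equal consecutive values), as in Source B
def runLens (ds : List Int) : List Int :=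
  match ds with
  | [] => []
  | d :: rest =>
    let st := rest.foldl (fun (s : List Int × Int × Int) x =>
      let (lens, d, cnt) := s
      if x == d then (lens, d, cnt + 1)
      else (lens ++ [cnt], x, 1)) ([], d, 1)
    st.1 ++ [st.2.2]

def sliceLengths_alt (A : List Int) : List Int :=
  if A.length < 3 then []
  else (runLens (List.zipWith (fun a b => b - a) A A.tail)).map (· + 1)

-- ===== PRECONDITION & SPEC =====
def Spec_sliceLengths (A : List Int) (out : List Int) : Prop := out = sliceLengths_alt A
instance (A : List Int) (out : List Int) : Decidable (Spec_sliceLengths A out) := by unfold Spec_sliceLengths; infer_instance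

-- ===== CLAIM (what is proved, stated in full; the proofs are below) =====
def Claim_equal_sliceLengths : Prop := ∀ (A : List Int), Dom_sliceLengths A → Spec_sliceLengths A (sliceLengths A)

-- ===== LEMMAS AND PROOFS =====

-- A's loop over the remaining elements equals B's RLE loop over the remaining diffs,
-- under the invariant: result = lens.map (+1), last diff = cur - prev, count = cnt + 1.
theorem sliceLengths_loop_eq (rest : List Int) :
    ∀ (prev cur : Int) (lens : List Int) (cnt : Int),
    (let st := rest.foldl (fun (s : List Int × Int × Int × Int) num =>
        let (result, prev, cur, count) := s
        if cur - prev == num - cur then (result, cur, num, count + 1)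
        else (result ++ [count], cur, num, 2)) (lens.map (· + 1), prev, cur, cnt + 1)
     st.1 ++ [st.2.2.2])
    =
    ((let st := (List.zipWith (fun a b => b - a) (cur :: rest) rest).foldl
        (fun (s : List Int × Int × Int) x =>
          let (lens, d, cnt) := s
          if x == d then (lens, d, cnt + 1)
          else (lens ++ [cnt], x, 1)) (lens, cur - prev, cnt)
      st.1 ++ [st.2.2]).map (· + 1)) := by
  induction rest with
  | nil => intro prev cur lens cnt; simp
  | cons num rest ih =>
    intro prev cur lens cnt
    simp only [List.zipWith, List.foldl]
    by_cases h : cur - prev = num - cur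
    · simp only [h, beq_self_eq_true, if_true]
      have := ih cur num lens (cnt + 1)
      simpa [h] using this
    · have hb : (num - cur == cur - prev) = false := by
        simp [beq_eq_false_iff_ne]; omega
      have hb' : (cur - prev == num - cur) = false := by
        simp [beq_eq_false_iff_ne]; omega
      simp only [hb, hb', if_false, Bool.false_eq_true]
      have := ih cur num (lens ++ [cnt]) 1
      simpa using this

-- ===== VERDICT (by name: the statement is the Claim_ definition above) =====
theorem sliceLengths_spec : Claim_equal_sliceLengths := by
  intro A _
  unfold Spec_sliceLengths sliceLengths sliceLengths_alt
  by_cases h : A.length < 3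
  · simp [h]
  · match A with
    | [] => simp at h
    | [a0] => simp at h
    | [a0, a1] => simp at h
    | a0 :: a1 :: a2 :: rest =>
      simp only [h, if_false, List.tail_cons, runLens]
      have := sliceLengths_loop_eq (a2 :: rest) a0 a1 [] 1
      simpa using this
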